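-- pv_equiv track=rewrite | github.com/Morninguoou/Leetcode | Number Complement.py | findComplement
-- ===== SOURCE A (Python) =====
-- def findComplement(num):
--     if num == 1:
--         return 0
--     elif num == 0:
--         return 1
--     binary = []
--     while num != 1:
--         temp = num % 2
--         binary.append(temp)
--         num -= temp
--         num = int(num / 2)
--     binary.append(1)
--     binary = binary[::-1]
--     binary_re = []
--     for n in binary:
--         if n == 1:
--             binary_re.append(0)
--         elif n == 0:
--             binary_re.append(1)
--     binary_re = binary_re[::-1]
--     total = 0
--     mul = 1
--     for b in binary_re:
--         total += b*mul
--         mul *= 2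
--     return total
-- ===== SOURCE B (Python) =====
-- def findComplement(num):
--     if num == 0:
--         return 1
--     return ((1 << num.bit_length()) - 1) - num
-- ===== Notes on version B (the rewrite author's own statement) =====
-- stated objective: simpler
-- what changed: Replaces the build-binary-list/flip/reverse/recompute pipeline with a closed form: subtract num from the all-ones mask of its bit length (with the num==0 -> 1 case kept).
import Mathlib
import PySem

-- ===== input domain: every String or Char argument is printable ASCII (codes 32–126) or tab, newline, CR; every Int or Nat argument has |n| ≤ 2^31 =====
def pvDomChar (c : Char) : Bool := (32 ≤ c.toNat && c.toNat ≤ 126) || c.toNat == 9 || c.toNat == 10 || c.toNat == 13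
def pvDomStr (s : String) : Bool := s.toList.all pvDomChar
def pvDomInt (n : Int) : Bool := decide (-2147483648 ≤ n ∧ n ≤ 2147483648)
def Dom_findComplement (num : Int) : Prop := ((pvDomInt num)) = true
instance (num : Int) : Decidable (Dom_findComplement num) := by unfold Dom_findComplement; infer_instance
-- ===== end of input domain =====

-- B replaces A's binary-list build / flip / reverse / recompute pipeline with the closed form
-- mask-of-bit-length minus num (objective: simpler).

-- ===== PORT A =====
-- the while loop: collects num % 2 into `binary`, then num -= temp; num = int(num/2).
-- `int(num/2)` on the even nonnegative `num - temp` equals floor division (exact here).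
-- Python's `while num != 1` diverges for num < 1 (excluded by Pre_); the `num ≤ 1` guard only makes it total.
def pvLoopA (num : Int) (binary : List Int) : List Int :=
  if num ≤ 1 then binary
  else
    let temp := PySem.Int.mod num 2
    pvLoopA (PySem.Int.floordiv (num - temp) 2) (binary ++ [temp])
termination_by num.toNat
decreasing_by
  rename_i h
  rw [PySem.Int.mod_eq_emod_of_pos (by omega), PySem.Int.floordiv_eq_ediv_of_pos (by omega)]
  omega

def findComplement (num : Int) : Int :=
  if num = 1 then 0
  else if num = 0 then 1
  else
    let binary := pvLoopA num [] ++ [1]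
    let binary := binary.reverse
    let binary_re :=
      binary.foldl (fun acc n => if n = 1 then acc ++ [0] else if n = 0 then acc ++ [1] else acc) []
    let binary_re := binary_re.reverse
    (binary_re.foldl (fun (p : Int × Int) b => (p.1 + b * p.2, p.2 * 2)) (0, 1)).1

-- ===== PORT B =====
def findComplement_alt (num : Int) : Int :=
  if num = 0 then 1
  else ((1 <<< PySem.Int.bitLength num) - 1) - num

-- ===== PRECONDITION & SPEC =====
-- Python A's while loop never terminates for num < 0 (num gets stuck at -1), so A only returns on num ≥ 0.
def Pre_findComplement (num : Int) : Prop := 0 ≤ num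
instance (num : Int) : Decidable (Pre_findComplement num) := by unfold Pre_findComplement; infer_instance
def pvWitness_findComplement : Int := (5)
def Spec_findComplement (num : Int) (out : Int) : Prop := out = findComplement_alt num
instance (num : Int) (out : Int) : Decidable (Spec_findComplement num out) := by unfold Spec_findComplement; infer_instance

-- ===== CLAIM (what is proved, stated in full; the proofs are below) =====
def Claim_equal_findComplement : Prop := ∀ (num : Int), Dom_findComplement num → Pre_findComplement num → Spec_findComplement num (findComplement num)

-- ===== LEMMAS AND PROOFS =====

-- LSB-first digit list of n (empty for n ≤ 1; the loop stops before emitting the leading 1)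
def pvBits (num : Int) : List Int :=
  if num ≤ 1 then []
  else PySem.Int.mod num 2 :: pvBits (PySem.Int.floordiv (num - PySem.Int.mod num 2) 2)
termination_by num.toNat
decreasing_by
  rename_i h
  rw [PySem.Int.mod_eq_emod_of_pos (by omega), PySem.Int.floordiv_eq_ediv_of_pos (by omega)]
  omega

-- value of an LSB-first digit list
def pvVal : List Int → Int
  | [] => 0
  | b :: r => b + 2 * pvVal r

lemma pvLoopA_eq (num : Int) (acc : List Int) : pvLoopA num acc = acc ++ pvBits num := by
  by_cases h : num ≤ 1
  · rw [pvLoopA, pvBits]; simp [h]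
  · rw [pvLoopA, pvBits]
    simp only [h, if_false]
    rw [pvLoopA_eq]
    simp
termination_by num.toNat
decreasing_by
  rw [PySem.Int.mod_eq_emod_of_pos (by omega), PySem.Int.floordiv_eq_ediv_of_pos (by omega)]
  omega

lemma pvBits_mem (num : Int) : ∀ b ∈ pvBits num, b = 0 ∨ b = 1 := by
  by_cases h : num ≤ 1
  · rw [pvBits]; simp [h]
  · rw [pvBits]
    simp only [h, if_false, List.mem_cons]
    intro b hb
    rcases hb with hb | hb
    · rw [hb, PySem.Int.mod_eq_emod_of_pos (by omega)]; omega
    · exact pvBits_mem _ b hb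
termination_by num.toNat
decreasing_by
  rw [PySem.Int.mod_eq_emod_of_pos (by omega), PySem.Int.floordiv_eq_ediv_of_pos (by omega)]
  omega

lemma pvVal_bits (num : Int) (h : 1 ≤ num) : pvVal (pvBits num ++ [1]) = num := by
  by_cases h1 : num ≤ 1
  · rw [pvBits]; simp [h1, pvVal]; omega
  · rw [pvBits]
    simp only [h1, if_false, List.cons_append, pvVal]
    rw [pvVal_bits _ (by
      rw [PySem.Int.mod_eq_emod_of_pos (by omega), PySem.Int.floordiv_eq_ediv_of_pos (by omega)]
      omega)]
    rw [PySem.Int.mod_eq_emod_of_pos (by omega), PySem.Int.floordiv_eq_ediv_of_pos (by omega)]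
    omega
termination_by num.toNat
decreasing_by
  rw [PySem.Int.mod_eq_emod_of_pos (by omega), PySem.Int.floordiv_eq_ediv_of_pos (by omega)]
  omega

lemma pvBits_len (num : Int) (h : 1 ≤ num) :
    (pvBits num ++ [1]).length = PySem.Int.bitLength num := by
  by_cases h1 : num ≤ 1
  · have : num = 1 := by omega
    subst this
    rw [pvBits]
    simp only [if_pos (by omega : (1:Int) ≤ 1), List.nil_append, List.length_cons,
      List.length_nil]
    rw [PySem.Int.bitLength_of_pos (by omega : (0:Int) < 1)]
    rw [PySem.Int.floordiv_eq_ediv_of_pos (by omega)]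
    norm_num [PySem.Int.bitLength_zero]
  · rw [pvBits]
    simp only [h1, if_false, List.cons_append, List.length_cons]
    rw [pvBits_len _ (by
      rw [PySem.Int.mod_eq_emod_of_pos (by omega), PySem.Int.floordiv_eq_ediv_of_pos (by omega)]
      omega)]
    rw [PySem.Int.bitLength_of_pos (by omega : 0 < num)]
    congr 2
    rw [PySem.Int.mod_eq_emod_of_pos (by omega)]
    rw [PySem.Int.floordiv_eq_ediv_of_pos (by omega), PySem.Int.floordiv_eq_ediv_of_pos (by omega)]
    omega
termination_by num.toNat
decreasing_by
  rw [PySem.Int.mod_eq_emod_of_pos (by omega), PySem.Int.floordiv_eq_ediv_of_pos (by omega)]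
  omega

lemma pvFlip_fold (bs acc : List Int) (h : ∀ b ∈ bs, b = 0 ∨ b = 1) :
    bs.foldl (fun acc n => if n = 1 then acc ++ [0] else if n = 0 then acc ++ [1] else acc) acc
      = acc ++ bs.map (fun b => 1 - b) := by
  induction bs generalizing acc with
  | nil => simp
  | cons b r ih =>
    simp only [List.foldl_cons, List.map_cons]
    rcases h b (by simp) with hb | hb <;> subst hb <;>
      simp [ih _ (fun x hx => h x (by simp [hx]))]

lemma pvTotal_fold (bs : List Int) (t m : Int) :
    (bs.foldl (fun (p : Int × Int) b => (p.1 + b * p.2, p.2 * 2)) (t, m)).1 = t + m * pvVal bs := by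
  induction bs generalizing t m with
  | nil => simp [pvVal]
  | cons b r ih => simp only [List.foldl_cons, ih, pvVal]; ring

lemma pvVal_flip (bs : List Int) :
    pvVal (bs.map (fun b => 1 - b)) = 2 ^ bs.length - 1 - pvVal bs := by
  induction bs with
  | nil => simp [pvVal]
  | cons b r ih => simp only [List.map_cons, pvVal, ih, List.length_cons]; ring

-- ===== VERDICT (by name: the statement is the Claim_ definition above) =====
theorem findComplement_spec : Claim_equal_findComplement := by
  intro num _ hpre
  unfold Spec_findComplement findComplement findComplement_alt
  by_cases h1 : num = 1
  · subst h1; decide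
  by_cases h0 : num = 0
  · subst h0; decide
  have h2 : 2 ≤ num := by unfold Pre_findComplement at hpre; omega
  simp only [h1, h0, if_false]
  rw [pvLoopA_eq]
  simp only [List.nil_append]
  rw [pvFlip_fold _ _ (by
    intro b hb
    simp only [List.mem_reverse] at hb
    rcases List.mem_append.mp hb with hb | hb
    · exact pvBits_mem num b hb
    · right; simpa using hb)]
  simp only [List.nil_append, List.map_reverse, List.reverse_reverse]
  rw [pvTotal_fold, pvVal_flip, pvVal_bits num (by omega), pvBits_len num (by omega)]
  push_cast [Nat.shiftLeft_eq]
  ring
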